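-- pv_equiv track=rewrite | github.com/techwiz42/debabelizer | src/debabelizer/core/processor.py | _select_best_stt_provider
-- ===== SOURCE A (Python) =====
-- from typing import Dict, Any, Optional, List, AsyncGenerator, Union
--
-- def _select_best_stt_provider(available_providers: List[str], strategy: str) -> str:
--     """Select best STT provider based on optimization strategy"""
--     # Define provider rankings for different strategies
--     provider_rankings = {
--         "cost": ["soniox", "deepgram", "azure", "google", "openai_whisper", "openai"],  # Cheapest first
--         "latency": ["soniox", "deepgram", "google", "azure", "openai_whisper", "openai"],  # Fastest first
--         "quality": ["openai_whisper", "openai", "google", "deepgram", "soniox", "azure"],  # Best quality first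
--         "balanced": ["deepgram", "soniox", "openai_whisper", "google", "openai", "azure"]  # Balanced approach
--     }
--
--     ranking = provider_rankings.get(strategy, provider_rankings["balanced"])
--
--     # Return first available provider in preference order
--     for provider in ranking:
--         if provider in available_providers:
--             return provider
--
--     # Fallback to first available
--     return available_providers[0]
-- ===== SOURCE B (Python) =====
-- def _select_best_stt_provider(available_providers, strategy):
--     """Select best STT provider based on optimization strategy"""
--     provider_rankings = {
--         "cost": ["soniox", "deepgram", "azure", "google", "openai_whisper", "openai"],
--         "latency": ["soniox", "deepgram", "google", "azure", "openai_whisper", "openai"],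
--         "quality": ["openai_whisper", "openai", "google", "deepgram", "soniox", "azure"],
--         "balanced": ["deepgram", "soniox", "openai_whisper", "google", "openai", "azure"],
--     }
--     ranking = provider_rankings.get(strategy, provider_rankings["balanced"])
--     # Rank each provider by its position in the ranking; unranked providers all
--     # share rank len(ranking), so stable min falls back to the first available one.
--     rank = {p: i for i, p in enumerate(ranking)}
--     return min(available_providers, key=lambda p: rank.get(p, len(ranking)))
-- ===== Notes on version B (the rewrite author's own statement) =====
-- stated objective: alternative
-- what changed: Instead of scanning the fixed ranking and testing membership in available_providers for each ranked provider, B builds a rank index once and takes the stable minimum of available_providers by rank (unranked providers get rank len(ranking), so the first available provider is the fallback).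
import Mathlib
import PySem

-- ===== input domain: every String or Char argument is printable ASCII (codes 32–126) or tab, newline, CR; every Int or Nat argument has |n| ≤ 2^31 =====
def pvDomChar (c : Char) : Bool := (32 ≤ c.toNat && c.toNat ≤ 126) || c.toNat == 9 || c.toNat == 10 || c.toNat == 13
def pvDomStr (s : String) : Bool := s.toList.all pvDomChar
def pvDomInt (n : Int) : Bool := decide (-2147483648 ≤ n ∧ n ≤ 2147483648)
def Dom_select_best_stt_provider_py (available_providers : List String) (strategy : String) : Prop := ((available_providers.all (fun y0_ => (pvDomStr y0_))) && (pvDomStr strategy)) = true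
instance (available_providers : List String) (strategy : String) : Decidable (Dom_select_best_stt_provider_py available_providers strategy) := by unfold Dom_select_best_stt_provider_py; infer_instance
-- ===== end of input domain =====

-- B replaces A's scan of the fixed ranking (membership test per ranked provider) by a rank
-- index built once and a stable min over available_providers; same return value on every
-- non-empty available_providers list (Pre_ excludes the empty list, where A raises IndexError).


-- the provider_rankings dict literal (shared data constant of both Pythons)
def pvRankings : PySem.Dict String (List String) :=
  PySem.Dict.ofList
    [("cost", ["soniox", "deepgram", "azure", "google", "openai_whisper", "openai"]),
     ("latency", ["soniox", "deepgram", "google", "azure", "openai_whisper", "openai"]),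
     ("quality", ["openai_whisper", "openai", "google", "deepgram", "soniox", "azure"]),
     ("balanced", ["deepgram", "soniox", "openai_whisper", "google", "openai", "azure"])]

-- ===== PORT A =====
-- for provider in ranking: if provider in available_providers: return provider; fallback available_providers[0]
def select_best_stt_provider_py (available_providers : List String) (strategy : String) : String :=
  let ranking := (pvRankings.get? strategy).getD ((pvRankings.get? "balanced").getD [])
  match ranking.find? (fun p => available_providers.contains p) with
  | some p => p
  | none => (PySem.List.pyGet? available_providers 0).getD ""  -- none excluded by Pre_

-- ===== PORT B =====
-- rank = {p: i for i, p in enumerate(ranking)}; min(available_providers, key=lambda p: rank.get(p, len(ranking)))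
def select_best_stt_provider_py_alt (available_providers : List String) (strategy : String) : String :=
  let ranking := (pvRankings.get? strategy).getD ((pvRankings.get? "balanced").getD [])
  let rank : PySem.Dict String Int :=
    (PySem.List.enumerate ranking).foldl (fun d ip => d.insert ip.2 ip.1) PySem.Dict.empty
  (PySem.List.min? available_providers (fun p => rank.getD p (ranking.length : Int))).getD ""  -- none excluded by Pre_

-- ===== PRECONDITION & SPEC =====
-- Pre_ excludes exactly the empty available_providers list: there A raises IndexError
-- (and B raises ValueError from min of an empty sequence).
def Pre_select_best_stt_provider_py (available_providers : List String) (strategy : String) : Prop :=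
  available_providers ≠ []
instance (available_providers : List String) (strategy : String) : Decidable (Pre_select_best_stt_provider_py available_providers strategy) := by unfold Pre_select_best_stt_provider_py; infer_instance

def pvWitness_select_best_stt_provider_py : List String × String := (["deepgram", "azure"], "cost")

def Spec_select_best_stt_provider_py (available_providers : List String) (strategy : String) (out : String) : Prop := out = select_best_stt_provider_py_alt available_providers strategy
instance (available_providers : List String) (strategy : String) (out : String) : Decidable (Spec_select_best_stt_provider_py available_providers strategy out) := by unfold Spec_select_best_stt_provider_py; infer_instance

-- ===== CLAIM (what is proved, stated in full; the proofs are below) =====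
def Claim_equal_select_best_stt_provider_py : Prop := ∀ (available_providers : List String) (strategy : String), Dom_select_best_stt_provider_py available_providers strategy → Pre_select_best_stt_provider_py available_providers strategy → Spec_select_best_stt_provider_py available_providers strategy (select_best_stt_provider_py available_providers strategy)

-- ===== LEMMAS AND PROOFS =====

-- the step function of PySem.List.min? (keeps the FIRST minimal element)
def pvStep (key : String → Int) : Option String → String → Option String :=
  fun acc x => match acc with
    | none => some x
    | some m => if key x < key m then some x else some m

theorem pv_min?_eq_foldl (xs : List String) (key : String → Int) :
    PySem.List.min? xs key = xs.foldl (pvStep key) none := by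
  unfold PySem.List.min?
  congr 1
  funext acc x
  cases acc with
  | none => rfl
  | some m => by_cases h : key x < key m <;> simp [pvStep, h]

-- the min? foldl keeps its accumulator when nothing beats it
theorem pv_foldl_keep (key : String → Int) (t : List String) (m : String)
    (h : ∀ y ∈ t, ¬ key y < key m) :
    t.foldl (pvStep key) (some m) = some m := by
  induction t with
  | nil => rfl
  | cons y t' ih =>
    simp only [List.foldl_cons, pvStep]
    rw [if_neg (h y (by simp))]
    exact ih (fun z hz => h z (by simp [hz]))

-- the min? foldl with a strictly-smaller unique minimizer p in the list ends at p
theorem pv_foldl_find (key : String → Int) (t : List String) (p : String) :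
    ∀ (m : String), p ∈ t → key p < key m → (∀ y ∈ t, y ≠ p → key p < key y) →
    t.foldl (pvStep key) (some m) = some p := by
  induction t with
  | nil => intro m hm; simp at hm
  | cons y t' ih =>
    intro m hp hlt hmin
    simp only [List.foldl_cons]
    by_cases hyp : y = p
    · subst hyp
      show t'.foldl (pvStep key) (if key y < key m then some y else some m) = some y
      rw [if_pos hlt]
      refine pv_foldl_keep key t' y (fun z hz => ?_)
      by_cases hzp : z = y
      · subst hzp; exact lt_irrefl _
      · exact not_lt_of_gt (hmin z (by simp [hz]) hzp)
    · have hpt : p ∈ t' := by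
        cases hp with
        | head => exact absurd rfl hyp
        | tail _ h => exact h
      have hky : key p < key y := hmin y (by simp) hyp
      show t'.foldl (pvStep key) (if key y < key m then some y else some m) = some p
      by_cases hcmp : key y < key m
      · rw [if_pos hcmp]
        exact ih y hpt hky (fun z hz hzp => hmin z (by simp [hz]) hzp)
      · rw [if_neg hcmp]
        exact ih m hpt hlt (fun z hz hzp => hmin z (by simp [hz]) hzp)

theorem pv_min?_unique (key : String → Int) (xs : List String) (p : String)
    (hp : p ∈ xs) (hmin : ∀ y ∈ xs, y ≠ p → key p < key y) :
    PySem.List.min? xs key = some p := by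
  rw [pv_min?_eq_foldl]
  cases xs with
  | nil => simp at hp
  | cons x t =>
    simp only [List.foldl_cons]
    show t.foldl (pvStep key) (some x) = some p
    by_cases hxp : x = p
    · subst hxp
      refine pv_foldl_keep key t x (fun z hz => ?_)
      by_cases hzp : z = x
      · subst hzp; exact lt_irrefl _
      · exact not_lt_of_gt (hmin z (by simp [hz]) hzp)
    · have hpt : p ∈ t := by
        cases hp with
        | head => exact absurd rfl hxp
        | tail _ h => exact h
      exact pv_foldl_find key t p x hpt (hmin x (by simp) hxp)
        (fun z hz hzp => hmin z (by simp [hz]) hzp)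

theorem pv_min?_const_head (key : String → Int) (x : String) (t : List String)
    (h : ∀ y ∈ t, ¬ key y < key x) :
    PySem.List.min? (x :: t) key = some x := by
  rw [pv_min?_eq_foldl]
  simp only [List.foldl_cons]
  exact pv_foldl_keep key t x h

-- B's rank dictionary looks up the first index of p in ranking (length if absent)
theorem pv_rank_getD (ranking : List String) (hnd : ranking.Nodup) (p : String) :
    ((PySem.List.enumerate ranking).foldl (fun d ip => d.insert ip.2 ip.1)
        PySem.Dict.empty).getD p (ranking.length : Int) = (ranking.idxOf p : Int) := by
  have hmap : (PySem.List.enumerate ranking).map (fun ip => ip.2) = ranking :=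
    PySem.List.map_snd_enumerate ranking 0
  have hitems : ((PySem.List.enumerate ranking).foldl (fun d ip => d.insert ip.2 ip.1)
      PySem.Dict.empty).items
      = PySem.Dict.empty.items ++ (PySem.List.enumerate ranking).map (fun ip => (ip.2, ip.1)) := by
    apply PySem.Dict.items_foldl_insert_fresh
    · intro a _; exact PySem.Dict.contains_empty a.2
    · rw [hmap]; exact hnd
  have hempty : (PySem.Dict.empty : PySem.Dict String Int).items = [] := rfl
  have hkeys : ((PySem.List.enumerate ranking).foldl (fun d ip => d.insert ip.2 ip.1)
      PySem.Dict.empty).keys = ranking := by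
    simp only [PySem.Dict.keys, hitems, hempty, List.nil_append, List.map_map]
    exact hmap
  by_cases hmem : p ∈ ranking
  · have hlt : ranking.idxOf p < ranking.length := List.idxOf_lt_length_iff.mpr hmem
    have hpair : (p, (ranking.idxOf p : Int)) ∈
        ((PySem.List.enumerate ranking).foldl (fun d ip => d.insert ip.2 ip.1)
          PySem.Dict.empty).items := by
      rw [hitems, hempty]
      simp only [List.nil_append, List.mem_map]
      refine ⟨((ranking.idxOf p : Int), p), ?_, rfl⟩
      rw [PySem.List.mem_enumerate_iff]
      exact ⟨ranking.idxOf p, hlt, by rw [List.getElem_idxOf hlt]; simp⟩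
    exact PySem.Dict.getD_of_mem_items _ hpair (by rw [hkeys]; exact hnd) _
  · have hcon : ((PySem.List.enumerate ranking).foldl (fun d ip => d.insert ip.2 ip.1)
        PySem.Dict.empty).contains p = false := by
      by_contra h
      have hc : ((PySem.List.enumerate ranking).foldl (fun d ip => d.insert ip.2 ip.1)
          PySem.Dict.empty).contains p = true := by simpa using h
      have := (PySem.Dict.contains_iff_mem_keys _ _).mp hc
      rw [hkeys] at this
      exact hmem this
    rw [PySem.Dict.getD_of_not_contains _ _ hcon, List.idxOf_eq_length hmem]

-- the selected ranking (any strategy) has no duplicate providers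
theorem pv_ranking_nodup (strategy : String) :
    ((pvRankings.get? strategy).getD ((pvRankings.get? "balanced").getD [])).Nodup := by
  rw [show pvRankings =
      ((((PySem.Dict.empty.insert "cost" ["soniox", "deepgram", "azure", "google", "openai_whisper", "openai"]).insert
        "latency" ["soniox", "deepgram", "google", "azure", "openai_whisper", "openai"]).insert
        "quality" ["openai_whisper", "openai", "google", "deepgram", "soniox", "azure"]).insert
        "balanced" ["deepgram", "soniox", "openai_whisper", "google", "openai", "azure"]) from rfl]
  simp only [PySem.Dict.get?_insert, PySem.Dict.get?_empty]
  split_ifs <;> decide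

-- A's loop equals B's stable min, for any duplicate-free ranking and non-empty avail
theorem pv_core (ranking avail : List String) (hnd : ranking.Nodup) (hne : avail ≠ []) :
    (match ranking.find? (fun p => avail.contains p) with
      | some p => p
      | none => (PySem.List.pyGet? avail 0).getD "")
    = (PySem.List.min? avail (fun p => (ranking.idxOf p : Int))).getD "" := by
  cases hfind : ranking.find? (fun p => avail.contains p) with
  | none =>
    have hall := List.find?_eq_none.mp hfind
    cases avail with
    | nil => exact absurd rfl hne
    | cons x t =>
      have hnotin : ∀ a ∈ (x :: t), ranking.idxOf a = ranking.length := by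
        intro a ha
        apply List.idxOf_eq_length
        intro hmem
        exact hall a hmem (by simpa using ha)
      rw [pv_min?_const_head _ x t (fun y hy => by
        rw [hnotin y (by simp [hy]), hnotin x (by simp)]; exact lt_irrefl _)]
      simp [PySem.List.pyGet?, PySem.List.pyIdx?]
  | some p =>
    obtain ⟨hPp, i, hi, hgi, hmin⟩ := List.find?_eq_some_iff_getElem.mp hfind
    have hpavail : p ∈ avail := by simpa using hPp
    have hpi : ranking.idxOf p = i := by
      rw [← hgi]
      exact List.Nodup.idxOf_getElem hnd i hi
    have hub : ∀ a ∈ avail, a ≠ p → (ranking.idxOf p : Int) < (ranking.idxOf a : Int) := by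
      intro a ha hap
      rw [hpi]
      by_cases hmem : a ∈ ranking
      · have halt : ranking.idxOf a < ranking.length := List.idxOf_lt_length_iff.mpr hmem
        rcases lt_trichotomy (ranking.idxOf a) i with hlt | heq | hgt
        · exfalso
          have hnP := hmin (ranking.idxOf a) hlt
          rw [List.getElem_idxOf halt] at hnP
          simp only [Bool.not_eq_eq_eq_not, Bool.not_true] at hnP
          exact absurd ha (by simpa using hnP)
        · exfalso
          apply hap
          subst heq
          rw [← hgi, List.getElem_idxOf halt]
        · exact_mod_cast hgt
      · rw [List.idxOf_eq_length hmem]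
        exact_mod_cast hi
    rw [pv_min?_unique _ avail p hpavail hub]
    rfl

-- ===== VERDICT (by name: the statement is the Claim_ definition above) =====
theorem select_best_stt_provider_py_spec : Claim_equal_select_best_stt_provider_py := by
  intro avail strategy _hdom hpre
  unfold Spec_select_best_stt_provider_py
  unfold select_best_stt_provider_py select_best_stt_provider_py_alt
  have hnd := pv_ranking_nodup strategy
  simp only [pv_rank_getD _ hnd]
  exact pv_core _ avail hnd hpre
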